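-- pv_equiv track=rewrite | github.com/robertoo28/Vkallpa | app_pages/Dashboard_Multi.py | classify_equipment
-- ===== SOURCE A (Python) =====
-- def classify_equipment(nom_compteur):
--     """Classifie un compteur par batiment, fluide et usage"""
--     nom_lower = nom_compteur.lower()
--
--     # Identification du batiment avec priorite pour Mirail
--     if "mirail" in nom_lower:
--         batiment = "Mirail"
--     elif "agbt" in nom_lower:
--         batiment = "AGBT (Bat. Principal)"
--     elif "td r+1" in nom_lower:
--         batiment = "Tour Direction R+1"
--     elif "td r+2" in nom_lower:
--         batiment = "Tour Direction R+2"
--     elif "sous-station" in nom_lower or "thermique" in nom_lower: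
--         batiment = "Sous-station thermique"
--     elif "centrale de mesure" in nom_lower:
--         if "agbt" in nom_lower:
--             batiment = "AGBT (Bat. Principal)"
--         elif "td r+1" in nom_lower:
--             batiment = "Tour Direction R+1"
--         elif "td r+2" in nom_lower:
--             batiment = "Tour Direction R+2"
--         else:
--             batiment = "Centrale de mesure"
--     else:
--         if "rdc" in nom_lower:
--             batiment = "AGBT (Bat. Principal)"
--         elif "fictif" in nom_lower:
--             batiment = "AGBT (Bat. Principal)"
--         else:
--             batiment = "Autres"
--
--     # Identification du fluide
--     if "energie thermique" in nom_lower or "thermique" in nom_lower: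
--         fluide = "Energie thermique"
--     elif any(x in nom_lower for x in ["eau", "ecs", "sanitaire"]):
--         fluide = "Eau"
--     elif "gaz" in nom_lower:
--         fluide = "Gaz"
--     elif "electrique" in nom_lower or "compteur" in nom_lower:
--         fluide = "Electricite"
--     else:
--         fluide = "Electricite"
--
--     # Identification de l'usage
--     if any(x in nom_lower for x in ["cvc", "chauffage", "ventilation", "climatisation"]):
--         usage = "CVC"
--     elif "eclairage" in nom_lower:
--         usage = "Eclairage"
--     elif any(x in nom_lower for x in ["pc", "pcfm"]):
--         usage = "Prises de courant"
--     elif "ecs" in nom_lower or "ballon" in nom_lower: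
--         usage = "ECS"
--     elif "ascenseur" in nom_lower:
--         usage = "Transport vertical"
--     elif "photovoltaique" in nom_lower or "pv" in nom_lower:
--         usage = "Production PV"
--     else:
--         usage = "Autres"
--
--     return batiment, fluide, usage
-- ===== SOURCE B (Python) =====
-- # Different algorithm: instead of A's if/elif chains of substring-containment
-- # tests, B makes ONE left-to-right positional scan of the lowered name,
-- # collecting the SET of keywords that start at some position (naive
-- # multi-pattern text matching), then maps that set to the three labels via
-- # priority tables.  (A's nested agbt/td checks inside the 'centrale de
-- # mesure' branch are unreachable, and its 'electrique'/'compteur' branch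
-- # equals the default, so the tables omit them.)
--
-- _BATIMENT = [
--     (["mirail"], "Mirail"),
--     (["agbt"], "AGBT (Bat. Principal)"),
--     (["td r+1"], "Tour Direction R+1"),
--     (["td r+2"], "Tour Direction R+2"),
--     (["sous-station", "thermique"], "Sous-station thermique"),
--     (["centrale de mesure"], "Centrale de mesure"),
--     (["rdc"], "AGBT (Bat. Principal)"),
--     (["fictif"], "AGBT (Bat. Principal)"),
-- ]
--
-- _FLUIDE = [
--     (["energie thermique", "thermique"], "Energie thermique"),
--     (["eau", "ecs", "sanitaire"], "Eau"),
--     (["gaz"], "Gaz"),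
-- ]
--
-- _USAGE = [
--     (["cvc", "chauffage", "ventilation", "climatisation"], "CVC"),
--     (["eclairage"], "Eclairage"),
--     (["pc", "pcfm"], "Prises de courant"),
--     (["ecs", "ballon"], "ECS"),
--     (["ascenseur"], "Transport vertical"),
--     (["photovoltaique", "pv"], "Production PV"),
-- ]
--
-- # all distinct keywords of the three tables
-- _KEYWORDS = [
--     "mirail", "agbt", "td r+1", "td r+2", "sous-station", "thermique",
--     "centrale de mesure", "rdc", "fictif", "energie thermique", "eau",
--     "ecs", "sanitaire", "gaz", "cvc", "chauffage", "ventilation",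
--     "climatisation", "eclairage", "pc", "pcfm", "ballon", "ascenseur",
--     "photovoltaique", "pv",
-- ]
--
--
-- def _pick(matched, rules, default):
--     for kws, label in rules:
--         if any(k in matched for k in kws):
--             return label
--     return default
--
--
-- def classify_equipment(nom_compteur):
--     """Classifie un compteur par batiment, fluide et usage"""
--     nl = nom_compteur.lower()
--     matched = set()
--     for i in range(len(nl)):
--         for kw in _KEYWORDS:
--             if nl.startswith(kw, i):
--                 matched.add(kw)
--     return (
--         _pick(matched, _BATIMENT, "Autres"),
--         _pick(matched, _FLUIDE, "Electricite"),
--         _pick(matched, _USAGE, "Autres"),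
--     )
-- ===== Notes on version B (the rewrite author's own statement) =====
-- stated objective: alternative
-- what changed: B never tests substring containment: it makes one left-to-right positional scan of the lowered name, collecting the set of keywords that start at each position (naive multi-pattern text matching), then maps that set to the three labels via priority tables (dropping A's unreachable nested agbt/td checks and the redundant electrique/compteur branch that equals the default).
import Mathlib
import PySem

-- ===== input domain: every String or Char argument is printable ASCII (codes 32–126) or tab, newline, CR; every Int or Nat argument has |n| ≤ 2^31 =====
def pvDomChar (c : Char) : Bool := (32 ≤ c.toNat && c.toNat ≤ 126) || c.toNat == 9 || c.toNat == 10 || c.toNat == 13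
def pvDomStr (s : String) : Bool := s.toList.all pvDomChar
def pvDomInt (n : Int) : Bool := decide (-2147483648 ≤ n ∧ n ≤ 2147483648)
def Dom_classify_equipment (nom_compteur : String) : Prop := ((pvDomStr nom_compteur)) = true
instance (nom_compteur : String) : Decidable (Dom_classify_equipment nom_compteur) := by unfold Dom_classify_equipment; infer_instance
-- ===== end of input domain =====

-- B replaces A's if/elif substring tests by one positional scan collecting the matched-keyword set, then priority-table lookups (alternative; same cost).

-- ===== PORT A =====
def classify_equipment (nom_compteur : String) : String × String × String :=
  let nl := PySem.Str.lower nom_compteur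
  let batiment :=
    if PySem.Str.isIn "mirail" nl then "Mirail"
    else if PySem.Str.isIn "agbt" nl then "AGBT (Bat. Principal)"
    else if PySem.Str.isIn "td r+1" nl then "Tour Direction R+1"
    else if PySem.Str.isIn "td r+2" nl then "Tour Direction R+2"
    else if PySem.Str.isIn "sous-station" nl || PySem.Str.isIn "thermique" nl then "Sous-station thermique"
    else if PySem.Str.isIn "centrale de mesure" nl then
      if PySem.Str.isIn "agbt" nl then "AGBT (Bat. Principal)"
      else if PySem.Str.isIn "td r+1" nl then "Tour Direction R+1"
      else if PySem.Str.isIn "td r+2" nl then "Tour Direction R+2"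
      else "Centrale de mesure"
    else
      if PySem.Str.isIn "rdc" nl then "AGBT (Bat. Principal)"
      else if PySem.Str.isIn "fictif" nl then "AGBT (Bat. Principal)"
      else "Autres"
  let fluide :=
    if PySem.Str.isIn "energie thermique" nl || PySem.Str.isIn "thermique" nl then "Energie thermique"
    else if ["eau", "ecs", "sanitaire"].any (fun x => PySem.Str.isIn x nl) then "Eau"
    else if PySem.Str.isIn "gaz" nl then "Gaz"
    else if PySem.Str.isIn "electrique" nl || PySem.Str.isIn "compteur" nl then "Electricite"
    else "Electricite"
  let usage :=
    if ["cvc", "chauffage", "ventilation", "climatisation"].any (fun x => PySem.Str.isIn x nl) then "CVC"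
    else if PySem.Str.isIn "eclairage" nl then "Eclairage"
    else if ["pc", "pcfm"].any (fun x => PySem.Str.isIn x nl) then "Prises de courant"
    else if PySem.Str.isIn "ecs" nl || PySem.Str.isIn "ballon" nl then "ECS"
    else if PySem.Str.isIn "ascenseur" nl then "Transport vertical"
    else if PySem.Str.isIn "photovoltaique" nl || PySem.Str.isIn "pv" nl then "Production PV"
    else "Autres"
  (batiment, fluide, usage)

-- ===== PORT B =====
def ceBatimentRules : List (List String × String) :=
  [(["mirail"], "Mirail"),
   (["agbt"], "AGBT (Bat. Principal)"),
   (["td r+1"], "Tour Direction R+1"),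
   (["td r+2"], "Tour Direction R+2"),
   (["sous-station", "thermique"], "Sous-station thermique"),
   (["centrale de mesure"], "Centrale de mesure"),
   (["rdc"], "AGBT (Bat. Principal)"),
   (["fictif"], "AGBT (Bat. Principal)")]

def ceFluideRules : List (List String × String) :=
  [(["energie thermique", "thermique"], "Energie thermique"),
   (["eau", "ecs", "sanitaire"], "Eau"),
   (["gaz"], "Gaz")]

def ceUsageRules : List (List String × String) :=
  [(["cvc", "chauffage", "ventilation", "climatisation"], "CVC"),
   (["eclairage"], "Eclairage"),
   (["pc", "pcfm"], "Prises de courant"),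
   (["ecs", "ballon"], "ECS"),
   (["ascenseur"], "Transport vertical"),
   (["photovoltaique", "pv"], "Production PV")]

def ceKeywords : List String :=
  ["mirail", "agbt", "td r+1", "td r+2", "sous-station", "thermique",
   "centrale de mesure", "rdc", "fictif", "energie thermique", "eau",
   "ecs", "sanitaire", "gaz", "cvc", "chauffage", "ventilation",
   "climatisation", "eclairage", "pc", "pcfm", "ballon", "ascenseur",
   "photovoltaique", "pv"]

-- one positional scan of the text: 'nl.startswith(kw, i)' for 0 ≤ i is exactly
-- PySem.Chars.startswith on (nl.drop i)
def ceScan (nl : List Char) : PySem.Set String :=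
  (List.range nl.length).foldl
    (fun matched i =>
      ceKeywords.foldl
        (fun matched kw =>
          if PySem.Chars.startswith (nl.drop i) kw.toList then PySem.Set.add matched kw
          else matched)
        matched)
    PySem.Set.empty

def cePick (matched : PySem.Set String) (rules : List (List String × String)) (default : String) : String :=
  match rules with
  | [] => default
  | (kws, label) :: rest =>
      if kws.any (fun k => PySem.Set.contains matched k) then label
      else cePick matched rest default

def classify_equipment_alt (nom_compteur : String) : String × String × String :=
  let nl := PySem.Str.lower nom_compteur
  let matched := ceScan nl.toList
  (cePick matched ceBatimentRules "Autres",
   cePick matched ceFluideRules "Electricite",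
   cePick matched ceUsageRules "Autres")

-- ===== PRECONDITION & SPEC =====
def Spec_classify_equipment (nom_compteur : String) (out : String × String × String) : Prop := out = classify_equipment_alt nom_compteur
instance (nom_compteur : String) (out : String × String × String) : Decidable (Spec_classify_equipment nom_compteur out) := by unfold Spec_classify_equipment; infer_instance

-- ===== CLAIM (what is proved, stated in full; the proofs are below) =====
def Claim_equal_classify_equipment : Prop := ∀ (nom_compteur : String), Dom_classify_equipment nom_compteur → Spec_classify_equipment nom_compteur (classify_equipment nom_compteur)

-- ===== LEMMAS AND PROOFS =====

theorem ce_mem_inner (p : String → Bool) (x : String) :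
    ∀ (kws : List String) (m : PySem.Set String),
    (x ∈ kws.foldl (fun m kw => if p kw then PySem.Set.add m kw else m) m
      ↔ x ∈ m ∨ (x ∈ kws ∧ p x = true)) := by
  intro kws
  induction kws with
  | nil => intro m; simp
  | cons kw rest ih =>
      intro m
      simp only [List.foldl_cons, List.mem_cons]
      by_cases hp : p kw = true
      · rw [if_pos hp, ih]
        simp only [PySem.Set.mem_add]
        constructor
        · rintro ((h | rfl) | h)
          · exact Or.inl h
          · exact Or.inr ⟨Or.inl rfl, hp⟩
          · exact Or.inr ⟨Or.inr h.1, h.2⟩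
        · rintro (h | ⟨(rfl | h), hx⟩)
          · exact Or.inl (Or.inl h)
          · exact Or.inl (Or.inr rfl)
          · exact Or.inr ⟨h, hx⟩
      · rw [if_neg hp, ih]
        constructor
        · rintro (h | h)
          · exact Or.inl h
          · exact Or.inr ⟨Or.inr h.1, h.2⟩
        · rintro (h | ⟨(rfl | h), hx⟩)
          · exact Or.inl h
          · exact absurd hx hp
          · exact Or.inr ⟨h, hx⟩

theorem ce_mem_outer (q : Nat → String → Bool) (x : String) :
    ∀ (is : List Nat) (m : PySem.Set String),
    (x ∈ is.foldl
        (fun m i => ceKeywords.foldl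
          (fun m kw => if q i kw then PySem.Set.add m kw else m) m) m
      ↔ x ∈ m ∨ (x ∈ ceKeywords ∧ ∃ i ∈ is, q i x = true)) := by
  intro is
  induction is with
  | nil => intro m; simp
  | cons i rest ih =>
      intro m
      simp only [List.foldl_cons, ih, ce_mem_inner, List.mem_cons]
      constructor
      · rintro ((h | ⟨hk, hq⟩) | ⟨hk, j, hj, hq⟩)
        · exact Or.inl h
        · exact Or.inr ⟨hk, i, Or.inl rfl, hq⟩
        · exact Or.inr ⟨hk, j, Or.inr hj, hq⟩
      · rintro (h | ⟨hk, j, (rfl | hj), hq⟩)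
        · exact Or.inl (Or.inl h)
        · exact Or.inl (Or.inr ⟨hk, hq⟩)
        · exact Or.inr ⟨hk, j, hj, hq⟩

theorem ce_contains_scan (nl : List Char) (kw : String)
    (h1 : kw ∈ ceKeywords) (h2 : kw.toList ≠ []) :
    PySem.Set.contains (ceScan nl) kw = PySem.Chars.isIn kw.toList nl := by
  have key : kw ∈ ceScan nl ↔ PySem.Chars.isIn kw.toList nl = true := by
    unfold ceScan
    rw [ce_mem_outer]
    rw [← PySem.Chars.exists_prefix_drop_iff_isIn]
    constructor
    · rintro (h | ⟨_, i, _, hq⟩)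
      · simp [PySem.Set.empty] at h
      · exact ⟨i, (PySem.Chars.startswith_iff _ _).mp hq⟩
    · rintro ⟨j, hj⟩
      have hj' : j < nl.length := by
        by_contra hge
        rw [List.drop_eq_nil_of_le (Nat.le_of_not_lt hge)] at hj
        exact h2 (List.prefix_nil.mp hj)
      exact Or.inr ⟨h1, j, List.mem_range.mpr hj', (PySem.Chars.startswith_iff _ _).mpr hj⟩
  cases hx : PySem.Chars.isIn kw.toList nl with
  | true =>
      exact (PySem.Set.contains_iff _ _).mpr (key.mpr hx)
  | false =>
      by_contra hc
      have : PySem.Set.contains (ceScan nl) kw = true := by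
        cases h : PySem.Set.contains (ceScan nl) kw
        · exact absurd h hc
        · rfl
      rw [hx] at key
      exact (by simpa using key.mp ((PySem.Set.contains_iff _ _).mp this))

-- ===== VERDICT (by name: the statement is the Claim_ definition above) =====
theorem classify_equipment_spec : Claim_equal_classify_equipment := by
  intro s _
  show classify_equipment s = classify_equipment_alt s
  simp only [classify_equipment, classify_equipment_alt]
  have hc := fun kw h1 h2 => ce_contains_scan (PySem.Str.lower s).toList kw h1 h2
  simp only [cePick, ceBatimentRules, ceFluideRules, ceUsageRules, List.any_cons,
    List.any_nil, Bool.or_false]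
  rw [hc "mirail" (by decide) (by decide), hc "agbt" (by decide) (by decide),
      hc "td r+1" (by decide) (by decide), hc "td r+2" (by decide) (by decide),
      hc "sous-station" (by decide) (by decide), hc "thermique" (by decide) (by decide),
      hc "centrale de mesure" (by decide) (by decide), hc "rdc" (by decide) (by decide),
      hc "fictif" (by decide) (by decide), hc "energie thermique" (by decide) (by decide),
      hc "eau" (by decide) (by decide), hc "ecs" (by decide) (by decide),
      hc "sanitaire" (by decide) (by decide), hc "gaz" (by decide) (by decide),
      hc "cvc" (by decide) (by decide), hc "chauffage" (by decide) (by decide),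
      hc "ventilation" (by decide) (by decide), hc "climatisation" (by decide) (by decide),
      hc "eclairage" (by decide) (by decide), hc "pc" (by decide) (by decide),
      hc "pcfm" (by decide) (by decide), hc "ballon" (by decide) (by decide),
      hc "ascenseur" (by decide) (by decide), hc "photovoltaique" (by decide) (by decide),
      hc "pv" (by decide) (by decide)]
  simp only [PySem.Str.isIn]
  simp only [Prod.mk.injEq]
  refine ⟨?_, ?_, ?_⟩ <;> split_ifs <;> rfl
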